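-- pv_equiv track=rewrite | github.com/NUSTM/COQE | Baseline_Systems/data_utils/current_program_code.py | convert_eng_label_dict_by_mapping
-- ===== SOURCE A (Python) =====
-- import copy
--
-- def convert_eng_label_dict_by_mapping(label_col, mapping_col):
--     """
--     :param label_col: [{"entity_1": {(s_index, e_index)}}]
--     :param mapping_col: {bert_index: [char_index]}
--     :return:
--     """
--     assert len(label_col) == len(mapping_col)
--
--     convert_label_col = []
--     for index in range(len(label_col)):
--         sequence_label, sequence_map = copy.deepcopy(label_col[index]), mapping_col[index]
--
--         for key in sequence_label.keys():
--             sequence_label[key] = sorted(list(sequence_label[key]), key=lambda x: x[0])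
--
--             for k in range(len(sequence_label[key])):
--                 sequence_label[key][k] = list(sequence_label[key][k])
--
--         for key, elem_position_col in sequence_label.items():
--             for elem_index, elem_position in enumerate(elem_position_col):
--                 s_index = elem_position[0]
--                 e_index = elem_position[1]
--
--                 # 针对英文数据集可能存在空的情况
--                 if s_index == -1 or e_index == -1:
--                     sequence_label[key][elem_index] = [-1, -1]
--                 else:
--                     sequence_label[key][elem_index] = [sequence_map[s_index][0], sequence_map[e_index][-1]]
--
--                 if key == "result":
--                     sequence_label[key][elem_index].append(elem_position[-1])
--
--         for key in sequence_label.keys():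
--             for k in range(len(sequence_label[key])):
--                 sequence_label[key][k] = tuple(sequence_label[key][k])
--
--         convert_label_col.append(sequence_label)
--
--     return convert_label_col
-- ===== SOURCE B (Python) =====
-- def _ordered(spans, smap, key):
--     # online insertion sort: convert each span first, then insert it into an
--     # accumulator kept ordered by the original start index (no call to sorted)
--     ordered = []
--     for pos in spans:
--         s, e = pos[0], pos[1]
--         item = (-1, -1) if s == -1 or e == -1 else (smap[s][0], smap[e][-1])
--         if key == "result":
--             item += (pos[-1],)
--         i = 0
--         while i < len(ordered) and ordered[i][0] <= s:
--             i += 1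
--         ordered.insert(i, (s, item))
--     return [it for _, it in ordered]
--
--
-- def convert_eng_label_dict_by_mapping(label_col, mapping_col):
--     assert len(label_col) == len(mapping_col)
--     return [
--         {key: _ordered(spans, smap, key) for key, spans in labels.items()}
--         for labels, smap in zip(label_col, mapping_col)
--     ]
-- ===== Notes on version B (the rewrite author's own statement) =====
-- stated objective: alternative
-- what changed: B never calls sorted: it converts each span first and maintains the per-key output ordered online by insertion sort on the original start index, building each dict fresh instead of A's deepcopy plus sort-then-remap-then-tuple mutation passes.
import Mathlib
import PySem

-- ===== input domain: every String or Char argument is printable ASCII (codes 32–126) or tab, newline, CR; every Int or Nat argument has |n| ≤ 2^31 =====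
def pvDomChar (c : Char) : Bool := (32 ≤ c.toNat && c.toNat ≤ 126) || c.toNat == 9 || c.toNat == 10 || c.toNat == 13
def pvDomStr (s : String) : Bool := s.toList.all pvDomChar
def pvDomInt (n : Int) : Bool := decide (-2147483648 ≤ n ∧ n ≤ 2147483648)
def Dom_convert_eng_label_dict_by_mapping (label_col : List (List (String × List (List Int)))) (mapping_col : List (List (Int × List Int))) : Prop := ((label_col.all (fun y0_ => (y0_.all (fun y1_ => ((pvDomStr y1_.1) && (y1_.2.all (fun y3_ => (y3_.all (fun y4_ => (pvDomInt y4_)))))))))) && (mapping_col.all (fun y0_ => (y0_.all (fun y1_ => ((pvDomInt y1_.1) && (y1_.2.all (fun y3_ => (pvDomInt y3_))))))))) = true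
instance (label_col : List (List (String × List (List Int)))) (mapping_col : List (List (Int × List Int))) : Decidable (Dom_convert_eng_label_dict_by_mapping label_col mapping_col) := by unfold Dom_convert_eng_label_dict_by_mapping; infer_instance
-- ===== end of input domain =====

-- ===== PORT A =====
-- B replaces A's deepcopy + library sort + three mutation passes by one pass that converts each
-- span and keeps the per-key output ordered online by insertion (objective: alternative).
-- Return-value equivalence only (A deepcopies its input, so neither version mutates the caller's data).
def convert_eng_label_dict_by_mapping (label_col : List (List (String × List (List Int)))) (mapping_col : List (List (Int × List Int))) : List (List (String × List (List Int))) :=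
  if label_col.length = mapping_col.length then   -- assert; outside Pre_ when it fails
    (PySem.List.pyRange 0 (label_col.length : Int) 1).foldl (fun convert_label_col index =>
      let sequence_label := PySem.List.pyGetD label_col index []
      let sequence_map := PySem.Dict.mk (PySem.List.pyGetD mapping_col index [])
      -- first loop: sort each value list by x[0] (list() of the set is the value list itself)
      let p1 := sequence_label.map (fun kv =>
        (kv.1, PySem.List.sorted kv.2 (fun x => PySem.List.pyGetD x 0 0) false))
      -- second loop: remap every position in place
      let p2 := p1.map (fun kv =>
        (kv.1, kv.2.map (fun elem_position =>
          let s_index := PySem.List.pyGetD elem_position 0 0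
          let e_index := PySem.List.pyGetD elem_position 1 0
          let repl :=
            if s_index = -1 ∨ e_index = -1 then [(-1 : Int), -1]
            else [PySem.List.pyGetD (sequence_map.getD s_index []) 0 0,
                  PySem.List.pyGetD (sequence_map.getD e_index []) (-1) 0]
          if kv.1 = "result" then repl ++ [PySem.List.pyGetD elem_position (-1) 0] else repl)))
      -- third loop: tuple() each entry (identity on List Int)
      let p3 := p2.map (fun kv => (kv.1, kv.2.map (fun x => x)))
      convert_label_col ++ [p3]) []
  else []

-- ===== PORT B =====
-- 'ordered.insert(i, …)' after the while scan = insert before the first element whose key exceeds s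
def pvInsB (p : Int × List Int) : List (Int × List Int) → List (Int × List Int)
  | [] => [p]
  | q :: qs => if q.1 ≤ p.1 then q :: pvInsB p qs else p :: q :: qs

-- the converted item paired with its sort key s (the tuple built inside B's loop body)
def pvConvB (smap : PySem.Dict Int (List Int)) (key : String) (pos : List Int) : Int × List Int :=
  let s := PySem.List.pyGetD pos 0 0
  let e := PySem.List.pyGetD pos 1 0
  let item :=
    if s = -1 ∨ e = -1 then [(-1 : Int), -1]
    else [PySem.List.pyGetD (smap.getD s []) 0 0,
          PySem.List.pyGetD (smap.getD e []) (-1) 0]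
  (s, if key = "result" then item ++ [PySem.List.pyGetD pos (-1) 0] else item)

def pvOrderedB (spans : List (List Int)) (smap : PySem.Dict Int (List Int)) (key : String) : List (List Int) :=
  (spans.foldl (fun ordered pos => pvInsB (pvConvB smap key pos) ordered) []).map Prod.snd

def convert_eng_label_dict_by_mapping_alt (label_col : List (List (String × List (List Int)))) (mapping_col : List (List (Int × List Int))) : List (List (String × List (List Int))) :=
  if label_col.length = mapping_col.length then   -- assert; outside Pre_ when it fails
    List.zipWith (fun labels smap =>
      labels.map (fun kv => (kv.1, pvOrderedB kv.2 (PySem.Dict.mk smap) kv.1)))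
      label_col mapping_col
  else []

-- ===== PRECONDITION & SPEC =====
-- Pre_ excludes: unequal lengths (A's assert raises); positions shorter than 2 or remapped through a
-- missing/empty mapping entry (A raises IndexError/KeyError); association lists with duplicate dict keys
-- (no Python dict has them); and span sets in which two spans share the same first coordinate, on which
-- A's order of the tied spans is an accident of deepcopy's re-insertion into a fresh set (both orders defensible).
def Pre_convert_eng_label_dict_by_mapping (label_col : List (List (String × List (List Int)))) (mapping_col : List (List (Int × List Int))) : Prop :=
  label_col.length = mapping_col.length ∧
  ∀ p ∈ List.zip label_col mapping_col,
    (p.1.map Prod.fst).Nodup ∧ (p.2.map Prod.fst).Nodup ∧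
    ∀ kv ∈ p.1,
      (kv.2.map (fun pos => PySem.List.pyGetD pos 0 0)).Nodup ∧
      ∀ pos ∈ kv.2, 2 ≤ pos.length ∧
        (¬ (PySem.List.pyGetD pos 0 0 = -1 ∨ PySem.List.pyGetD pos 1 0 = -1) →
          (PySem.Dict.mk p.2).getD (PySem.List.pyGetD pos 0 0) [] ≠ [] ∧
          (PySem.Dict.mk p.2).getD (PySem.List.pyGetD pos 1 0) [] ≠ [])
instance (label_col : List (List (String × List (List Int)))) (mapping_col : List (List (Int × List Int))) : Decidable (Pre_convert_eng_label_dict_by_mapping label_col mapping_col) := by unfold Pre_convert_eng_label_dict_by_mapping; infer_instance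

def pvWitness_convert_eng_label_dict_by_mapping : (List (List (String × List (List Int)))) × (List (List (Int × List Int))) :=
  ([[("result", [[0, 1, 2]]), ("a", [[-1, -1]])]], [[(0, [3]), (1, [4, 5])]])

def Spec_convert_eng_label_dict_by_mapping (label_col : List (List (String × List (List Int)))) (mapping_col : List (List (Int × List Int))) (out : List (List (String × List (List Int)))) : Prop := out = convert_eng_label_dict_by_mapping_alt label_col mapping_col
instance (label_col : List (List (String × List (List Int)))) (mapping_col : List (List (Int × List Int))) (out : List (List (String × List (List Int)))) : Decidable (Spec_convert_eng_label_dict_by_mapping label_col mapping_col out) := by unfold Spec_convert_eng_label_dict_by_mapping; infer_instance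

-- ===== CLAIM (what is proved, stated in full; the proofs are below) =====
def Claim_equal_convert_eng_label_dict_by_mapping : Prop := ∀ (label_col : List (List (String × List (List Int)))) (mapping_col : List (List (Int × List Int))), Dom_convert_eng_label_dict_by_mapping label_col mapping_col → Pre_convert_eng_label_dict_by_mapping label_col mapping_col → Spec_convert_eng_label_dict_by_mapping label_col mapping_col (convert_eng_label_dict_by_mapping label_col mapping_col)

-- ===== LEMMAS AND PROOFS =====

-- A's indexed loop 'for index in range(len(label_col)): … acc.append(F(label_col[index], mapping_col[index]))'
-- collapses to zipWith when the two lists have equal length.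
lemma pv_foldl_range_eq_zipWith {α β γ : Type} (la : List α) (ma : List β) (F : α → β → γ)
    (da : α) (db : β) (h : la.length = ma.length) :
    (PySem.List.pyRange 0 (la.length : Int) 1).foldl
      (fun acc i => acc ++ [F (PySem.List.pyGetD la i da) (PySem.List.pyGetD ma i db)]) []
    = List.zipWith F la ma := by
  rw [PySem.List.foldl_append_singleton_eq_map, PySem.List.pyRange_zero_natCast]
  apply List.ext_getElem
  · simp [h]
  · intro i h1 h2
    simp only [List.length_append, List.length_nil, List.length_map, List.length_range] at h1
    simp only [List.nil_append, List.getElem_map, List.getElem_range,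
      PySem.List.pyGetD_natCast, List.getElem_zipWith]
    rw [List.getD_eq_getElem _ _ (by omega), List.getD_eq_getElem _ _ (by omega)]

-- inserting converted items keyed by the original start index commutes with converting after insertion
lemma pv_insB_conv_comm (smap : PySem.Dict Int (List Int)) (key : String) (pos : List Int)
    (xs : List (List Int)) :
    pvInsB (pvConvB smap key pos) (xs.map (pvConvB smap key))
      = (PySem.List.insertBy
          (fun a b => decide (PySem.List.pyGetD a 0 0 < PySem.List.pyGetD b 0 0)) pos xs).map
          (pvConvB smap key) := by
  induction xs with
  | nil => rfl
  | cons y ys ih =>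
      have hk : ∀ z : List Int, (pvConvB smap key z).1 = PySem.List.pyGetD z 0 0 := fun _ => rfl
      simp only [List.map_cons, pvInsB, PySem.List.insertBy, hk, decide_eq_true_eq]
      by_cases h : PySem.List.pyGetD pos 0 0 < PySem.List.pyGetD y 0 0
      · rw [if_neg (by omega), if_pos h, List.map_cons, List.map_cons]
      · rw [if_pos (by omega), if_neg h, List.map_cons, ih]

-- hence B's whole fold is the conversion of A's sorted list
lemma pv_orderedB_eq (smap : PySem.Dict Int (List Int)) (key : String) (spans : List (List Int)) :
    pvOrderedB spans smap key
      = (PySem.List.sorted spans (fun x => PySem.List.pyGetD x 0 0) false).map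
          (fun pos => (pvConvB smap key pos).2) := by
  have main : ∀ (xs acc : List (List Int)),
      xs.foldl (fun ordered pos => pvInsB (pvConvB smap key pos) ordered)
        (acc.map (pvConvB smap key))
      = (xs.foldl (fun a p => PySem.List.insertBy
          (fun a b => decide (PySem.List.pyGetD a 0 0 < PySem.List.pyGetD b 0 0)) p a) acc).map
          (pvConvB smap key) := by
    intro xs
    induction xs with
    | nil => intro acc; rfl
    | cons x xs ih =>
        intro acc
        simp only [List.foldl_cons, pv_insB_conv_comm]
        exact ih _
  have h0 := main spans []
  simp only [List.map_nil] at h0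
  unfold pvOrderedB
  rw [h0, ← PySem.List.sorted_eq_foldl_insertBy, List.map_map]
  rfl

-- ===== VERDICT (by name: the statement is the Claim_ definition above) =====
theorem convert_eng_label_dict_by_mapping_spec : Claim_equal_convert_eng_label_dict_by_mapping := by
  intro label_col mapping_col _ hpre
  unfold Spec_convert_eng_label_dict_by_mapping
  unfold convert_eng_label_dict_by_mapping convert_eng_label_dict_by_mapping_alt
  rw [if_pos hpre.1, if_pos hpre.1]
  refine .trans (pv_foldl_range_eq_zipWith label_col mapping_col
      (F := fun sequence_label smap =>
        ((sequence_label.map (fun kv =>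
            (kv.1, PySem.List.sorted kv.2 (fun x => PySem.List.pyGetD x 0 0) false))).map (fun kv =>
          (kv.1, kv.2.map (fun elem_position =>
            let s_index := PySem.List.pyGetD elem_position 0 0
            let e_index := PySem.List.pyGetD elem_position 1 0
            let repl :=
              if s_index = -1 ∨ e_index = -1 then [(-1 : Int), -1]
              else [PySem.List.pyGetD ((PySem.Dict.mk smap).getD s_index []) 0 0,
                    PySem.List.pyGetD ((PySem.Dict.mk smap).getD e_index []) (-1) 0]
            if kv.1 = "result" then repl ++ [PySem.List.pyGetD elem_position (-1) 0] else repl)))).map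
          (fun kv => (kv.1, kv.2.map (fun x => x))))
      [] [] hpre.1) ?_
  congr 1
  funext labels smap
  simp only [List.map_map]
  apply List.map_congr_left
  intro kv _
  rw [pv_orderedB_eq]
  simp [pvConvB]
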